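-- pv_equiv track=rewrite | github.com/pelotbdr/iribio_scripts | longread_DNA/dnafrag.py | cigar_process
-- ===== SOURCE A (Python) =====
-- def cigar_process(seq):
--     nbrs=['1','2','3','4','5','6','7','8','9','0']
--     point=0
--     soft=[]
--     insert=[]
--     delet=[]
--     for i in range(len(seq)):
--         if(seq[i] not in nbrs):
--             if(seq[i]=='S'):
--                 soft.append(seq[point:i])
--             if(seq[i]=='I'):
--                 insert.append(seq[point:i])
--             if(seq[i]=='D'):
--                 delet.append(seq[point:i])
--             point=i+1
--     total=0
--     for elem in soft:
--         total+=int(elem)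
--     for elem in insert:
--         total+=int(elem)
--     for elem in delet:
--         total-=int(elem)
--
--     return total
-- ===== SOURCE B (Python) =====
-- def cigar_process(seq):
--     sign = {'S': 1, 'I': 1, 'D': -1}
--     total = 0
--     num = ''
--     for ch in seq:
--         if ch in '0123456789':
--             num += ch
--         else:
--             s = sign.get(ch)
--             if s is not None:
--                 total += s * int(num)
--             num = ''
--     return total
-- ===== Notes on version B (the rewrite author's own statement) =====
-- stated objective: faster
-- what changed: Replaces A's index-based slicing parser (point index, three per-operator lists, three summation loops) with an index-free tokenizer that builds each count in a digit buffer while streaming over the characters and applies a sign looked up in a {'S':1,'I':1,'D':-1} table the moment the operator is seen; one pass, no per-index indexing or intermediate lists.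
import Mathlib
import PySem

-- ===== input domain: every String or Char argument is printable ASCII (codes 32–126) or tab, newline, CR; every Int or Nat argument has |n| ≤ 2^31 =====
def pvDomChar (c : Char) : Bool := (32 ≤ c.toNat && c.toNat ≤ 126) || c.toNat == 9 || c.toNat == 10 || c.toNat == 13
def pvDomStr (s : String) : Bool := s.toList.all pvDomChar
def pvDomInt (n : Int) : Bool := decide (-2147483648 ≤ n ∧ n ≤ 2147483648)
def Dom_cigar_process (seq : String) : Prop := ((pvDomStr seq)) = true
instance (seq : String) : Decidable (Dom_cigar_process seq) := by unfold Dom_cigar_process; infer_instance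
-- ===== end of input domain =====

-- B replaces A's index/slice parser with an index-free tokenizer: a digit buffer plus a sign table.

-- ===== PORT A =====
-- A's state: (point, soft, insert, delet); then three summation loops over the lists.
def cigarStepA (cs : List Char) (s : Int × List (List Char) × List (List Char) × List (List Char))
    (i : Int) : Int × List (List Char) × List (List Char) × List (List Char) :=
  match s with
  | (point, soft, ins, del) =>
    let c := PySem.List.pyGetD cs i ' '
    if c ∉ (['1','2','3','4','5','6','7','8','9','0'] : List Char) then
      let soft := if c = 'S' then soft ++ [PySem.List.slice cs (some point) (some i)] else soft
      let ins  := if c = 'I' then ins ++ [PySem.List.slice cs (some point) (some i)] else ins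
      let del  := if c = 'D' then del ++ [PySem.List.slice cs (some point) (some i)] else del
      (i + 1, soft, ins, del)
    else s

def cigar_process (seq : String) : Int :=
  let cs := seq.toList
  match (PySem.List.pyRange 0 (PySem.List.len cs) 1).foldl (cigarStepA cs) (0, [], [], []) with
  | (_, soft, ins, del) =>
    -- total = 0; three accumulation loops; int(elem) = ofChars? (getD 0 unreachable under Pre_)
    let t1 := soft.foldl (fun t e => t + (PySem.Int.ofChars? e).getD 0) 0
    let t2 := ins.foldl (fun t e => t + (PySem.Int.ofChars? e).getD 0) t1
    del.foldl (fun t e => t - (PySem.Int.ofChars? e).getD 0) t2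

-- ===== PORT B =====
-- sign = {'S': 1, 'I': 1, 'D': -1}
def signDict : PySem.Dict Char Int := PySem.Dict.ofList [('S', 1), ('I', 1), ('D', -1)]

-- B's state: (total, num digit buffer); one pass over the characters, no indices.
def cigarStepB (s : Int × List Char) (ch : Char) : Int × List Char :=
  match s with
  | (total, num) =>
    if ch ∈ (['0','1','2','3','4','5','6','7','8','9'] : List Char) then (total, num ++ [ch])
    else
      let total :=
        match PySem.Dict.get? signDict ch with
        | some sg => total + sg * (PySem.Int.ofChars? num).getD 0   -- int(num); getD 0 unreachable under Pre_
        | none => total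
      (total, [])

def cigar_process_alt (seq : String) : Int :=
  (seq.toList.foldl cigarStepB (0, [])).1

-- ===== PRECONDITION & SPEC =====
-- Pre_ excludes exactly the inputs on which the Python A raises ValueError: an
-- 'S'/'I'/'D' at position i whose preceding count segment seq[point:i] is empty,
-- i.e. i = 0 or seq[i-1] is not a decimal digit (int('') raises).
def Pre_cigar_process (seq : String) : Prop :=
  ∀ i < seq.toList.length,
    seq.toList[i]! ∈ (['S','I','D'] : List Char) → 1 ≤ i ∧ (seq.toList[i-1]!).isDigit
instance (seq : String) : Decidable (Pre_cigar_process seq) := by unfold Pre_cigar_process; infer_instance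
def pvWitness_cigar_process : String := "10S5I3D2M"

def Spec_cigar_process (seq : String) (out : Int) : Prop := out = cigar_process_alt seq
instance (seq : String) (out : Int) : Decidable (Spec_cigar_process seq out) := by unfold Spec_cigar_process; infer_instance

-- ===== CLAIM (what is proved, stated in full; the proofs are below) =====
def Claim_equal_cigar_process : Prop := ∀ (seq : String), Dom_cigar_process seq → Pre_cigar_process seq → Spec_cigar_process seq (cigar_process seq)

-- ===== LEMMAS AND PROOFS =====

-- value of int(elem) ported (getD 0 is unreachable under Pre_)
def cigarVal (e : List Char) : Int := (PySem.Int.ofChars? e).getD 0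

theorem foldl_add_cigarVal (l : List (List Char)) (a : Int) :
    l.foldl (fun t e => t + (PySem.Int.ofChars? e).getD 0) a = a + (l.map cigarVal).sum := by
  induction l generalizing a with
  | nil => simp
  | cons x xs ih => simp [List.foldl_cons, ih, cigarVal]; ring

theorem foldl_sub_cigarVal (l : List (List Char)) (a : Int) :
    l.foldl (fun t e => t - (PySem.Int.ofChars? e).getD 0) a = a - (l.map cigarVal).sum := by
  induction l generalizing a with
  | nil => simp
  | cons x xs ih => simp [List.foldl_cons, ih, cigarVal]; ring

-- one loop step preserves the joint invariant of A's loop and B's loop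
theorem cigar_step (cs : List Char) (m p : Nat) (hp : p ≤ m) (hm : m < cs.length)
    (tb : Int) (soft ins del : List (List Char))
    (h2 : tb = (soft.map cigarVal).sum + (ins.map cigarVal).sum - (del.map cigarVal).sum) :
    (let sa := cigarStepA cs ((p : Int), soft, ins, del) (m : Int);
     let sb := cigarStepB (tb, (cs.drop p).take (m - p)) cs[m];
     ∃ q : Nat, sa.1 = (q : Int) ∧ q ≤ m + 1 ∧ sb.2 = (cs.drop q).take (m + 1 - q) ∧
       sb.1 = (sa.2.1.map cigarVal).sum + (sa.2.2.1.map cigarVal).sum - (sa.2.2.2.map cigarVal).sum) := by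
  have hc : PySem.List.pyGetD cs (m : Int) ' ' = cs[m] := by
    rw [PySem.List.pyGetD_natCast]
    exact List.getD_eq_getElem cs ' ' hm
  have hext : (cs.drop p).take (m - p) ++ [cs[m]] = (cs.drop p).take (m + 1 - p) := by
    have hlt : m - p < (cs.drop p).length := by simp [List.length_drop]; omega
    have : m + 1 - p = (m - p) + 1 := by omega
    rw [this, List.take_add_one]
    have : (cs.drop p)[m - p]? = some cs[m] := by
      rw [List.getElem?_drop]
      have : p + (m - p) = m := by omega
      rw [this, List.getElem?_eq_getElem hm]
    simp [this]
  have hslice : PySem.List.slice cs (some (p : Int)) (some (m : Int)) = (cs.drop p).take (m - p) :=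
    PySem.List.slice_natCast cs p m
  unfold cigarStepA cigarStepB
  rw [hc]
  by_cases hd : cs[m] ∈ (['1','2','3','4','5','6','7','8','9','0'] : List Char)
  · have hd' : cs[m] ∈ (['0','1','2','3','4','5','6','7','8','9'] : List Char) := by
      simp only [List.mem_cons, List.not_mem_nil, or_false] at hd ⊢; tauto
    simp only [hd, not_true_eq_false, hd']
    exact ⟨p, rfl, by omega, hext, h2⟩
  · have hd' : cs[m] ∉ (['0','1','2','3','4','5','6','7','8','9'] : List Char) := by
      simp only [List.mem_cons, List.not_mem_nil, or_false] at hd ⊢; tauto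
    simp only [hd, not_false_eq_true, if_pos, hd', if_neg, hslice]
    refine ⟨m + 1, by push_cast; ring, le_refl _, by simp, ?_⟩
    by_cases hS : cs[m] = 'S'
    · have : PySem.Dict.get? signDict 'S' = some 1 := by decide
      simp [hS, this, h2, cigarVal]; ring
    · by_cases hI : cs[m] = 'I'
      · have : PySem.Dict.get? signDict 'I' = some 1 := by decide
        simp [hI, this, h2, cigarVal]; ring
      · by_cases hD : cs[m] = 'D'
        · have : PySem.Dict.get? signDict 'D' = some (-1) := by decide
          simp [hD, this, h2, cigarVal]; ring
        · have hmk : signDict = PySem.Dict.mk [('S', 1), ('I', 1), ('D', -1)] := by decide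
          have : PySem.Dict.get? signDict cs[m] = none := by
            rw [hmk, PySem.Dict.get?_mk_cons, PySem.Dict.get?_mk_cons, PySem.Dict.get?_mk_cons]
            simp only [beq_iff_eq]
            rw [if_neg (fun h => hS h.symm), if_neg (fun h => hI h.symm), if_neg (fun h => hD h.symm)]
            rfl
          simp [hS, hI, hD, this, h2]

-- the joint invariant after the first m characters
theorem cigar_invariant (cs : List Char) (m : Nat) (hm : m ≤ cs.length) :
    (let sa := (PySem.List.pyRange 0 (m : Int) 1).foldl (cigarStepA cs) (0, [], [], []);
     let sb := (cs.take m).foldl cigarStepB (0, []);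
     ∃ p : Nat, sa.1 = (p : Int) ∧ p ≤ m ∧ sb.2 = (cs.drop p).take (m - p) ∧
       sb.1 = (sa.2.1.map cigarVal).sum + (sa.2.2.1.map cigarVal).sum - (sa.2.2.2.map cigarVal).sum) := by
  induction m with
  | zero => exact ⟨0, by simp [PySem.List.pyRange_one_eq_nil]⟩
  | succ m ih =>
    have hmlt : m < cs.length := by omega
    obtain ⟨p, h1, hp, hnum, h2⟩ := ih (by omega)
    have hsplitR : PySem.List.pyRange 0 ((m : Int) + 1) 1
        = PySem.List.pyRange 0 (m : Int) 1 ++ [(m : Int)] :=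
      PySem.List.pyRange_one_succ_right (by positivity)
    have hsplitT : cs.take (m + 1) = cs.take m ++ [cs[m]] := by
      rw [List.take_add_one, List.getElem?_eq_getElem hmlt]; simp
    simp only [Nat.cast_succ] at *
    rw [hsplitR, hsplitT, List.foldl_append, List.foldl_append]
    simp only [List.foldl_cons, List.foldl_nil]
    set sa := (PySem.List.pyRange 0 (m : Int) 1).foldl (cigarStepA cs) (0, [], [], []) with hsa
    set sb := (cs.take m).foldl cigarStepB (0, []) with hsb
    obtain ⟨pa, soft, ins, del⟩ := sa
    obtain ⟨tb, num⟩ := sb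
    simp only at h1 h2 hnum
    subst h1; subst hnum
    exact cigar_step cs m p hp hmlt tb soft ins del h2

-- ===== VERDICT (by name: the statement is the Claim_ definition above) =====
theorem cigar_process_spec : Claim_equal_cigar_process := by
  intro seq _ _
  unfold Spec_cigar_process cigar_process cigar_process_alt
  have := cigar_invariant seq.toList seq.toList.length (le_refl _)
  simp only [List.take_length, PySem.List.len_eq] at this ⊢
  obtain ⟨p, h1, hp, hnum, h2⟩ := this
  set sa := (PySem.List.pyRange 0 (seq.toList.length : Int) 1).foldl (cigarStepA seq.toList) (0, [], [], []) with hsa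
  set sb := seq.toList.foldl cigarStepB (0, []) with hsb
  obtain ⟨pa, soft, ins, del⟩ := sa
  obtain ⟨tb, num⟩ := sb
  simp only at h2 ⊢
  rw [foldl_add_cigarVal, foldl_add_cigarVal, foldl_sub_cigarVal]
  linarith
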